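-- pv_equiv track=rewrite | github.com/ajkerr0/kappa | kappa/antechamber/atomtype/atomtype.py | eliminate_subpaths
-- ===== SOURCE A (Python) =====
-- def eliminate_subpaths(masterList, path):
--     """Return a path list with the sub paths removed."""
--
--     subPaths = [path[0:i] for i in range(len(path)+1)]
--     listCopy = masterList[:]
--
--     for list_ in masterList:
--         for subPath in subPaths:
--             if list_ == subPath:
--                 listCopy.remove(subPath)
--
--     return listCopy
-- ===== SOURCE B (Python) =====
-- def eliminate_subpaths(masterList, path):
--     """Return a path list with the sub paths removed."""
--     return [lst for lst in masterList if lst != path[:len(lst)]]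
-- ===== Notes on version B (the rewrite author's own statement) =====
-- stated objective: faster
-- what changed: Replaces the build-all-prefixes table plus nested scan with list.remove (each remove rescans the copy) by a single filtering pass that tests each element directly with one length-bounded slice comparison.
import Mathlib
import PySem

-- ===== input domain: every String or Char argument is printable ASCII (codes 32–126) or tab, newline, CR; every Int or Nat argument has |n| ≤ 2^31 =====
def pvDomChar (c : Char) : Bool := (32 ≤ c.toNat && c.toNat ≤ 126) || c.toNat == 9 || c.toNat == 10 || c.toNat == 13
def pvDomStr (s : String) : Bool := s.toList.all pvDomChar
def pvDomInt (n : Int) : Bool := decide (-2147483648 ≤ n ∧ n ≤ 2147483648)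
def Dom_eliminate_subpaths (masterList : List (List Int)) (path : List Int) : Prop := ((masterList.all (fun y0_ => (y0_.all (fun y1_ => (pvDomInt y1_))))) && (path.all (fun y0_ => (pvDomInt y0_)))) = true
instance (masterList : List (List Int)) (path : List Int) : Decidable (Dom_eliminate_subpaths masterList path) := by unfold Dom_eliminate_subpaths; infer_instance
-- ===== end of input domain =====

-- B replaces A's prefix table + nested scan with list.remove by one direct filtering pass (objective: simpler).

-- ===== PORT A =====
-- 'listCopy.remove(subPath)' never raises here (the removed value is always present when
-- the branch fires, since listCopy starts as a copy of masterList); the '.getD lc'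
-- fallback of the Option-returning PySem.List.remove? is unreachable.
def eliminate_subpaths (masterList : List (List Int)) (path : List Int) : List (List Int) :=
  let subPaths := (PySem.List.pyRange 0 ((path.length : Int) + 1)).map
    (fun i => PySem.List.slice path (some 0) (some i))
  let listCopy := PySem.List.slice masterList none none
  masterList.foldl (fun lc list_ =>
    subPaths.foldl (fun lc subPath =>
      if list_ = subPath then (PySem.List.remove? lc subPath).getD lc else lc) lc) listCopy

-- ===== PORT B =====
def eliminate_subpaths_alt (masterList : List (List Int)) (path : List Int) : List (List Int) :=
  masterList.filter (fun lst => decide (lst ≠ PySem.List.slice path none (some (lst.length : Int))))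

-- ===== PRECONDITION & SPEC =====
def Spec_eliminate_subpaths (masterList : List (List Int)) (path : List Int) (out : List (List Int)) : Prop := out = eliminate_subpaths_alt masterList path
instance (masterList : List (List Int)) (path : List Int) (out : List (List Int)) : Decidable (Spec_eliminate_subpaths masterList path out) := by unfold Spec_eliminate_subpaths; infer_instance

-- ===== CLAIM (what is proved, stated in full; the proofs are below) =====
def Claim_equal_eliminate_subpaths : Prop := ∀ (masterList : List (List Int)) (path : List Int), Dom_eliminate_subpaths masterList path → Spec_eliminate_subpaths masterList path (eliminate_subpaths masterList path)

-- ===== LEMMAS AND PROOFS =====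

-- A's subPaths table is exactly the list of take-prefixes of path.
theorem subPaths_eq (path : List Int) :
    (PySem.List.pyRange 0 ((path.length : Int) + 1)).map
      (fun i => PySem.List.slice path (some 0) (some i))
    = (List.range (path.length + 1)).map (fun k => path.take k) := by
  have h : ((path.length : Int) + 1) = ((path.length + 1 : Nat) : Int) := by push_cast; ring
  rw [h, PySem.List.pyRange_zero_natCast, List.map_map]
  refine List.map_congr_left (fun k hk => ?_)
  simp [PySem.List.slice_zero_start, PySem.List.slice_to_natCast]

-- the prefix table has no duplicates (prefixes have pairwise distinct lengths)
theorem prefixes_nodup (path : List Int) :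
    ((List.range (path.length + 1)).map (fun k => path.take k)).Nodup := by
  apply List.Nodup.map_on _ (List.nodup_range)
  intro i hi j hj hij
  simp only [List.mem_range] at hi hj
  have : (path.take i).length = (path.take j).length := by rw [hij]
  simpa [List.length_take, Nat.min_eq_left (by omega : i ≤ path.length),
    Nat.min_eq_left (by omega : j ≤ path.length)] using this

-- filtering a duplicate-free list for equality with a yields [a] or []
theorem filter_eq_of_nodup {α : Type} [DecidableEq α] (a : α) :
    ∀ (l : List α), l.Nodup →
      l.filter (fun x => decide (a = x)) = if a ∈ l then [a] else [] := by
  intro l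
  induction l with
  | nil => simp
  | cons x t ih =>
    intro hnd
    by_cases hax : a = x
    · subst hax
      have : t.filter (fun x => decide (a = x)) = [] := by
        apply List.filter_eq_nil_iff.mpr
        intro y hy
        simp only [decide_eq_true_eq]
        exact fun h => (List.nodup_cons.mp hnd).1 (h ▸ hy)
      simp [this]
    · have := ih (List.nodup_cons.mp hnd).2
      simp [hax, this]

-- removing the first occurrence when it is known not to occur earlier
theorem remove?_append_cons (m : List Int) :
    ∀ (l1 l2 : List (List Int)), m ∉ l1 →
      PySem.List.remove? (l1 ++ m :: l2) m = some (l1 ++ l2) := by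
  intro l1
  induction l1 with
  | nil => intro l2 _; simp
  | cons x t ih =>
    intro l2 hm
    have hx : x ≠ m := fun h => hm (by simp [h])
    rw [List.cons_append, PySem.List.remove?_cons_of_ne _ hx,
      ih l2 (fun h => hm (by simp [h]))]
    simp

-- A's inner loop over the prefix table: remove list_ once iff it is a prefix of path
theorem inner_loop (path : List Int) (m : List Int) (lc : List (List Int)) :
    ((List.range (path.length + 1)).map (fun k => path.take k)).foldl
      (fun lc subPath => if m = subPath then (PySem.List.remove? lc subPath).getD lc else lc) lc
    = if m <+: path then (PySem.List.remove? lc m).getD lc else lc := by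
  rw [PySem.List.foldl_ite_eq_foldl_filter (p := fun subPath => m = subPath)]
  rw [filter_eq_of_nodup m _ (prefixes_nodup path)]
  have hmem : m ∈ (List.range (path.length + 1)).map (fun k => path.take k) ↔ m <+: path := by
    constructor
    · rintro h
      simp only [List.mem_map, List.mem_range] at h
      obtain ⟨k, _, rfl⟩ := h
      exact List.take_prefix k path
    · intro h
      simp only [List.mem_map, List.mem_range]
      exact ⟨m.length, by have := h.length_le; omega, (List.prefix_iff_eq_take.mp h).symm⟩
  by_cases h : m <+: path
  · rw [if_pos (hmem.mpr h)]; simp [h]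
  · rw [if_neg (fun hm => h (hmem.mp hm))]; simp [h]

-- the outer loop is a filter: invariant over the processed/remaining split
theorem outer_loop (path : List Int) :
    ∀ (rest done : List (List Int)),
      rest.foldl (fun lc m => if m <+: path then (PySem.List.remove? lc m).getD lc else lc)
        (done.filter (fun m => !decide (m <+: path)) ++ rest)
      = done.filter (fun m => !decide (m <+: path))
        ++ rest.filter (fun m => !decide (m <+: path)) := by
  intro rest
  induction rest with
  | nil => intro done; simp
  | cons m rs ih =>
    intro done
    simp only [List.foldl_cons]
    by_cases h : m <+: path
    · have hnm : m ∉ done.filter (fun m => !decide (m <+: path)) := by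
        simp [List.mem_filter, h]
      rw [if_pos h, remove?_append_cons m _ rs hnm]
      have := ih (done ++ [m])
      simpa [List.filter_append, List.filter_cons, h] using this
    · rw [if_neg h]
      have := ih (done ++ [m])
      have heq : (done ++ [m]).filter (fun m => !decide (m <+: path))
          = done.filter (fun m => !decide (m <+: path)) ++ [m] := by
        simp [List.filter_append, h]
      rw [heq, List.append_assoc] at this
      simpa [List.filter_cons, h] using this

-- B's per-element slice test is exactly the prefix test
theorem alt_test (path lst : List Int) :
    (decide (lst ≠ PySem.List.slice path none (some (lst.length : Int))))
    = !decide (lst <+: path) := by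
  rw [PySem.List.slice_to_natCast]
  by_cases h : lst <+: path
  · simp [h, (List.prefix_iff_eq_take.mp h).symm]
  · have hne : lst ≠ path.take lst.length := fun he => h (List.prefix_iff_eq_take.mpr he)
    simp [h, hne]

-- ===== VERDICT (by name: the statement is the Claim_ definition above) =====
theorem eliminate_subpaths_spec : Claim_equal_eliminate_subpaths := by
  intro masterList path _
  unfold Spec_eliminate_subpaths eliminate_subpaths eliminate_subpaths_alt
  simp only [subPaths_eq, PySem.List.slice_none_none]
  have hcongr : masterList.foldl (fun lc list_ =>
      ((List.range (path.length + 1)).map (fun k => path.take k)).foldl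
        (fun lc subPath => if list_ = subPath then (PySem.List.remove? lc subPath).getD lc else lc) lc)
      masterList
      = masterList.foldl (fun lc m =>
          if m <+: path then (PySem.List.remove? lc m).getD lc else lc) masterList := by
    apply PySem.List.foldl_congr_mem
    intro lc m _
    exact inner_loop path m lc
  rw [hcongr]
  have := outer_loop path masterList []
  simp only [List.filter_nil, List.nil_append] at this
  rw [this]
  apply List.filter_congr
  intro m _
  exact (alt_test path m).symm
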